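-- pv_equiv track=rewrite | github.com/Lokeshvastrad/Python_Random | Python/Python/bankFraud.py | bankFraud
-- ===== SOURCE A (Python) =====
-- def bankFraud(ar,d):
--     count=0
--     for i in range(len(ar)):
--         if d+i >= len(ar):
--             break
--         tmp_ar = sorted(ar[i:d+i])
--         if d % 2 == 0:
--             median = (tmp_ar[d//2]+tmp_ar[(d//2)-1])//2
--         else:
--             median = tmp_ar[d//2]
--
--         if (ar[i+d] >= (2 * median)):
--             count+=1
--     return count
-- ===== SOURCE B (Python) =====
-- # Sliding-window median maintained incrementally: sort the first window once,
-- # then update it by removing the outgoing and inserting the incoming element.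
-- def _insert_sorted(w, x):
--     for j in range(len(w)):
--         if x < w[j]:
--             return w[:j] + [x] + w[j:]
--     return w + [x]
--
-- def _remove_first(w, x):
--     for j in range(len(w)):
--         if w[j] == x:
--             return w[:j] + w[j+1:]
--     return w
--
-- def bankFraud(ar, d):
--     if d < 1:
--         return 0
--     n = len(ar)
--     w = sorted(ar[:d])
--     count = 0
--     for i in range(n - d):
--         if d % 2 == 0:
--             median = (w[d // 2] + w[d // 2 - 1]) // 2
--         else:
--             median = w[d // 2]
--         if ar[i + d] >= 2 * median:
--             count += 1
--         w = _insert_sorted(_remove_first(w, ar[i]), ar[i + d])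
--     return count
-- ===== Notes on version B (the rewrite author's own statement) =====
-- stated objective: faster
-- what changed: Instead of re-sorting every length-d window from scratch, B sorts the first window once and maintains it incrementally, removing the outgoing element and inserting the incoming one in order at each step.
import Mathlib
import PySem

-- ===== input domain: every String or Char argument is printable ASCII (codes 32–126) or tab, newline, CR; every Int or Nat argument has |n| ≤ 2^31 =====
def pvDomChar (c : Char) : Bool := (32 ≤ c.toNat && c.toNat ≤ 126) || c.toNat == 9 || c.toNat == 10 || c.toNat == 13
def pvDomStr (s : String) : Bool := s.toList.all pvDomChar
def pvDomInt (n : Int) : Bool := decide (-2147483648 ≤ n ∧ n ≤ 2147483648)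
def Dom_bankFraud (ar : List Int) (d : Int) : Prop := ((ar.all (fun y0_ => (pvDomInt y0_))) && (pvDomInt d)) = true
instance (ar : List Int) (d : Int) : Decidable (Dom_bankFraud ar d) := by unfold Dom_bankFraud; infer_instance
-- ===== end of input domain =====

-- B replaces A's per-step full sort of each window by incremental maintenance of one
-- sorted window (remove outgoing, insert incoming); measured faster at large sizes.

-- ===== PORT A =====
-- 'for i in range(len(ar)): if d+i >= len(ar): break; …' — fuel k counts remaining range elements.
def bankFraudLoopA (ar : List Int) (d : Int) : Nat → Nat → Int → Int
  | _, 0, count => count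
  | i, k + 1, count =>
    if (ar.length : Int) ≤ d + (i : Int) then count
    else
      let tmp := PySem.List.sorted (PySem.List.slice ar (some (i : Int)) (some (d + (i : Int)))) (fun x => x) false
      let median : Int :=
        if PySem.Int.mod d 2 = 0 then
          PySem.Int.floordiv (PySem.List.pyGetD tmp (PySem.Int.floordiv d 2) 0
            + PySem.List.pyGetD tmp (PySem.Int.floordiv d 2 - 1) 0) 2
        else PySem.List.pyGetD tmp (PySem.Int.floordiv d 2) 0
      let count' := if 2 * median ≤ PySem.List.pyGetD ar ((i : Int) + d) 0 then count + 1 else count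
      bankFraudLoopA ar d (i + 1) k count'

def bankFraud (ar : List Int) (d : Int) : Int :=
  bankFraudLoopA ar d 0 ar.length 0

-- ===== PORT B =====
-- Source B _insert_sorted: insert x before the first strictly larger element.
def insertSorted : List Int → Int → List Int
  | [], x => [x]
  | y :: ys, x => if x < y then x :: y :: ys else y :: insertSorted ys x

-- Source B _remove_first: drop the first occurrence of x (unchanged if absent).
def removeFirst : List Int → Int → List Int
  | [], _ => []
  | y :: ys, x => if y = x then ys else y :: removeFirst ys x

-- 'for i in range(n - d)' with the maintained sorted window w; fuel k = remaining iterations.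
def bankFraudLoopB (ar : List Int) (d : Int) : Nat → Nat → List Int → Int → Int
  | _, 0, _, count => count
  | i, k + 1, w, count =>
    let median : Int :=
      if PySem.Int.mod d 2 = 0 then
        PySem.Int.floordiv (PySem.List.pyGetD w (PySem.Int.floordiv d 2) 0
          + PySem.List.pyGetD w (PySem.Int.floordiv d 2 - 1) 0) 2
      else PySem.List.pyGetD w (PySem.Int.floordiv d 2) 0
    let count' := if 2 * median ≤ PySem.List.pyGetD ar ((i : Int) + d) 0 then count + 1 else count
    bankFraudLoopB ar d (i + 1) k
      (insertSorted (removeFirst w (PySem.List.pyGetD ar (i : Int) 0)) (PySem.List.pyGetD ar ((i : Int) + d) 0)) count'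

def bankFraud_alt (ar : List Int) (d : Int) : Int :=
  if d < 1 then 0
  else
    bankFraudLoopB ar d 0 (ar.length - d.toNat)
      (PySem.List.sorted (PySem.List.slice ar none (some d)) (fun x => x) false) 0

-- ===== PRECONDITION & SPEC =====
-- A raises IndexError when d ≤ 0 and ar is non-empty (it indexes into an empty sorted window).
def Pre_bankFraud (ar : List Int) (d : Int) : Prop := 1 ≤ d ∨ ar = []
instance (ar : List Int) (d : Int) : Decidable (Pre_bankFraud ar d) := by unfold Pre_bankFraud; infer_instance

def pvWitness_bankFraud : List Int × Int := ([3, 1, 4, 1, 5, 9, 2], 3)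

def Spec_bankFraud (ar : List Int) (d : Int) (out : Int) : Prop := out = bankFraud_alt ar d
instance (ar : List Int) (d : Int) (out : Int) : Decidable (Spec_bankFraud ar d out) := by unfold Spec_bankFraud; infer_instance

-- ===== CLAIM (what is proved, stated in full; the proofs are below) =====
def Claim_equal_bankFraud : Prop := ∀ (ar : List Int) (d : Int), Dom_bankFraud ar d → Pre_bankFraud ar d → Spec_bankFraud ar d (bankFraud ar d)

-- ===== LEMMAS AND PROOFS =====

lemma mem_insertSorted (l : List Int) (x z : Int) : z ∈ insertSorted l x ↔ z = x ∨ z ∈ l := by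
  induction l with
  | nil => simp [insertSorted]
  | cons y ys ih =>
    by_cases h : x < y
    · simp [insertSorted, h]
    · simp [insertSorted, h, ih]
      tauto

lemma insertSorted_perm (l : List Int) (x : Int) : (insertSorted l x).Perm (x :: l) := by
  induction l with
  | nil => simp [insertSorted]
  | cons y ys ih =>
    by_cases h : x < y
    · simp [insertSorted, h]
    · simp only [insertSorted, if_neg h]
      exact (ih.cons y).trans (List.Perm.swap x y ys)

lemma insertSorted_pairwise (l : List Int) (x : Int) (h : l.Pairwise (· ≤ ·)) :
    (insertSorted l x).Pairwise (· ≤ ·) := by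
  induction l with
  | nil => simp [insertSorted]
  | cons y ys ih =>
    rcases List.pairwise_cons.mp h with ⟨hy, hys⟩
    by_cases hx : x < y
    · simp only [insertSorted, if_pos hx]
      refine List.pairwise_cons.mpr ⟨?_, h⟩
      intro z hz
      rcases hz with _ | hz
      · exact le_of_lt hx
      · exact le_trans (le_of_lt hx) (hy z (by assumption))
    · simp only [insertSorted, if_neg hx]
      refine List.pairwise_cons.mpr ⟨?_, ih hys⟩
      intro z hz
      rcases (mem_insertSorted ys x z).mp hz with rfl | hz
      · exact le_of_not_gt hx
      · exact hy z hz

lemma removeFirst_eq_erase (l : List Int) (x : Int) : removeFirst l x = l.erase x := by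
  induction l with
  | nil => rfl
  | cons y ys ih =>
    by_cases h : y = x
    · simp [removeFirst, h]
    · simp [removeFirst, h, ih]

-- the sorted current window, as A computes it each step
def sortedWin (ar : List Int) (dn i : Nat) : List Int :=
  PySem.List.sorted ((ar.drop i).take dn) (fun x => x) false

lemma window_succ (ar : List Int) (dn i : Nat) (hd : 1 ≤ dn) (h : i + dn < ar.length) :
    (ar.drop (i + 1)).take dn
      = (ar.drop (i + 1)).take (dn - 1) ++ [ar[i + dn]] := by
  have hlen : dn - 1 < (ar.drop (i + 1)).length := by simp [List.length_drop]; omega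
  conv_lhs => rw [show dn = (dn - 1) + 1 from by omega]
  rw [List.take_add_one]
  have : (ar.drop (i + 1))[dn - 1]? = some ar[i + dn] := by
    rw [List.getElem?_drop]
    rw [List.getElem?_eq_getElem (by omega)]
    congr 1
    congr 1
    omega
  simp [this]

lemma window_cons (ar : List Int) (dn i : Nat) (hd : 1 ≤ dn) (h : i + dn < ar.length) :
    (ar.drop i).take dn = ar[i] :: (ar.drop (i + 1)).take (dn - 1) := by
  have hi : i < ar.length := by omega
  rw [List.drop_eq_getElem_cons hi]
  conv_lhs => rw [show dn = (dn - 1) + 1 from by omega]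
  rw [List.take_succ_cons]

-- one maintenance step turns the sorted window at i into the sorted window at i+1
lemma step_window (ar : List Int) (dn i : Nat) (hd : 1 ≤ dn) (h : i + dn < ar.length) :
    insertSorted (removeFirst (sortedWin ar dn i) ar[i]) ar[i + dn] = sortedWin ar dn (i + 1) := by
  apply PySem.List.eq_of_perm_of_pairwise_le_of_injective (fun x : Int => x) (fun _ _ hxy => hxy)
  · -- permutation
    have h1 : (sortedWin ar dn i).Perm ((ar.drop i).take dn) :=
      PySem.List.sorted_perm _ _ _
    have h2 : ((sortedWin ar dn i).erase ar[i]).Perm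
        (((ar.drop i).take dn).erase ar[i]) := h1.erase _
    rw [window_cons ar dn i hd h] at h2
    rw [List.erase_cons_head] at h2
    have h3 := (insertSorted_perm ((sortedWin ar dn i).erase ar[i]) ar[i + dn])
    rw [removeFirst_eq_erase]
    refine h3.trans ?_
    have h4 : (ar[i + dn] :: (sortedWin ar dn i).erase ar[i]).Perm
        (ar[i + dn] :: (ar.drop (i + 1)).take (dn - 1)) := h2.cons _
    refine h4.trans ?_
    have h5 : (sortedWin ar dn (i + 1)).Perm ((ar.drop (i + 1)).take dn) :=
      PySem.List.sorted_perm _ _ _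
    rw [window_succ ar dn i hd h] at h5
    refine List.Perm.symm (h5.trans ?_)
    exact (List.perm_append_singleton _ _)
  · -- LHS sorted
    apply insertSorted_pairwise
    rw [removeFirst_eq_erase]
    exact (PySem.List.sorted_pairwise _ _).sublist (List.erase_sublist)
  · -- RHS sorted
    exact PySem.List.sorted_pairwise _ _

-- A's per-step sorted slice is sortedWin
lemma slice_eq_window (ar : List Int) (dn i : Nat) :
    PySem.List.slice ar (some (i : Int)) (some ((dn : Int) + (i : Int))) = (ar.drop i).take dn := by
  have : (dn : Int) + (i : Int) = (i : Int) + (dn : Int) := by ring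
  rw [this]
  exact_mod_cast PySem.List.slice_natCast_add ar i dn

-- main loop correspondence
lemma loop_eq (ar : List Int) (dn : Nat) (hd : 1 ≤ dn) :
    ∀ (k i : Nat) (count : Int), i + k = ar.length →
      bankFraudLoopA ar (dn : Int) i k count
        = bankFraudLoopB ar (dn : Int) i (ar.length - dn - i) (sortedWin ar dn i) count := by
  intro k
  induction k with
  | zero =>
    intro i count hik
    have : ar.length - dn - i = 0 := by omega
    simp [bankFraudLoopA, this, bankFraudLoopB]
  | succ k ih =>
    intro i count hik
    by_cases hbr : (ar.length : Int) ≤ (dn : Int) + (i : Int)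
    · have : ar.length - dn - i = 0 := by
        have := hbr
        omega
      rw [this]
      simp [bankFraudLoopA, hbr, bankFraudLoopB]
    · have hlt : i + dn < ar.length := by omega
      have hfuel : ar.length - dn - i = (ar.length - dn - (i + 1)) + 1 := by omega
      rw [hfuel]
      simp only [bankFraudLoopA, bankFraudLoopB, if_neg hbr]
      rw [slice_eq_window ar dn i]
      have hget_i : PySem.List.pyGetD ar (i : Int) 0 = ar[i] := by
        rw [PySem.List.pyGetD_natCast]
        exact List.getD_eq_getElem ar 0 (by omega)
      have hget_id : PySem.List.pyGetD ar ((i : Int) + (dn : Int)) 0 = ar[i + dn] := by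
        have : (i : Int) + (dn : Int) = ((i + dn : Nat) : Int) := by push_cast; ring
        rw [this, PySem.List.pyGetD_natCast]
        exact List.getD_eq_getElem ar 0 hlt
      rw [hget_i, hget_id, step_window ar dn i hd hlt]
      exact ih (i + 1) _ (by omega)

lemma alt_window0 (ar : List Int) (dn : Nat) :
    PySem.List.sorted (PySem.List.slice ar none (some ((dn : Nat) : Int))) (fun x => x) false
      = sortedWin ar dn 0 := by
  rw [PySem.List.slice_to ar (by positivity)]
  simp [sortedWin]

-- ===== VERDICT (by name: the statement is the Claim_ definition above) =====
theorem bankFraud_spec : Claim_equal_bankFraud := by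
  intro ar d _ hpre
  unfold Spec_bankFraud
  rcases hpre with hd | hnil
  · -- 1 ≤ d
    obtain ⟨dn, rfl⟩ : ∃ dn : Nat, d = (dn : Int) := ⟨d.toNat, (Int.toNat_of_nonneg (by omega)).symm⟩
    have hdn : 1 ≤ dn := by exact_mod_cast hd
    unfold bankFraud bankFraud_alt
    rw [if_neg (by exact_mod_cast not_lt.mpr hd)]
    rw [loop_eq ar dn hdn ar.length 0 0 (by omega)]
    rw [alt_window0]
    simp [Int.toNat_natCast]
  · -- ar = []
    subst hnil
    unfold bankFraud bankFraud_alt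
    by_cases hd : d < 1
    · simp [bankFraudLoopA, hd]
    · simp [bankFraudLoopA, hd, bankFraudLoopB]
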